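-- pv_equiv track=rewrite | github.com/agungw132/chat-mcp-google | src/chat_google/chat_service.py | _extract_mcp_doc_policy
-- ===== SOURCE A (Python) =====
-- def _extract_mcp_doc_policy(server_name: str, body: str) -> str:
--     section = ""
--     purpose = ""
--     tools: list[str] = []
--     notes: list[str] = []
--     note_sections = {
--         "important limitations for calling agents",
--         "constraints",
--         "constraints and limits",
--         "reliability notes for calling agents",
--     }
--
--     for raw_line in body.splitlines():
--         line = raw_line.strip()
--         if not line:
--             continue
--         if line.startswith("## "):
--             section = line[3:].strip().lower()
--             continue
--         if section == "purpose" and not purpose: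
--             purpose = line
--             continue
--         if section == "tool catalog" and line.startswith("- `"):
--             tools.append(line[3:].split("`", 1)[0])
--             continue
--         if section in note_sections and line.startswith("- "):
--             notes.append(line[2:].strip())
--
--     tool_preview = ", ".join(tools[:12]) if tools else "no tools listed"
--     note_preview = "; ".join(notes[:2]) if notes else "no additional constraints"
--     purpose_text = purpose or "no purpose section"
--     return (
--         f"{server_name}: purpose={purpose_text}; tools={tool_preview}; notes={note_preview}"
--     )
-- ===== SOURCE B (Python) =====
-- def _extract_mcp_doc_policy(server_name: str, body: str) -> str:
--     note_sections = {
--         "important limitations for calling agents",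
--         "constraints",
--         "constraints and limits",
--         "reliability notes for calling agents",
--     }
--     # Pass 1: tag every non-empty, non-header line with its current section name.
--     tagged: list[tuple[str, str]] = []
--     section = ""
--     for raw_line in body.splitlines():
--         line = raw_line.strip()
--         if line.startswith("## "):
--             section = line[3:].strip().lower()
--         elif line:
--             tagged.append((section, line))
--     # Pass 2: extract each field from the tagged lines.
--     purpose_lines = [l for s, l in tagged if s == "purpose"]
--     purpose = purpose_lines[0] if purpose_lines else ""
--     tools = [l[3:].split("`", 1)[0] for s, l in tagged if s == "tool catalog" and l.startswith("- `")]
--     notes = [l[2:].strip() for s, l in tagged if s in note_sections and l.startswith("- ")]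
--     tool_preview = ", ".join(tools[:12]) if tools else "no tools listed"
--     note_preview = "; ".join(notes[:2]) if notes else "no additional constraints"
--     purpose_text = purpose or "no purpose section"
--     return f"{server_name}: purpose={purpose_text}; tools={tool_preview}; notes={note_preview}"
-- ===== Notes on version B (the rewrite author's own statement) =====
-- stated objective: simpler
-- what changed: A's single stateful loop carrying four mutable accumulators is replaced by a tag-then-extract decomposition: one pass tags each non-empty line with its current section name, then three independent comprehensions derive purpose, tools and notes from the tagged list.
import Mathlib
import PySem

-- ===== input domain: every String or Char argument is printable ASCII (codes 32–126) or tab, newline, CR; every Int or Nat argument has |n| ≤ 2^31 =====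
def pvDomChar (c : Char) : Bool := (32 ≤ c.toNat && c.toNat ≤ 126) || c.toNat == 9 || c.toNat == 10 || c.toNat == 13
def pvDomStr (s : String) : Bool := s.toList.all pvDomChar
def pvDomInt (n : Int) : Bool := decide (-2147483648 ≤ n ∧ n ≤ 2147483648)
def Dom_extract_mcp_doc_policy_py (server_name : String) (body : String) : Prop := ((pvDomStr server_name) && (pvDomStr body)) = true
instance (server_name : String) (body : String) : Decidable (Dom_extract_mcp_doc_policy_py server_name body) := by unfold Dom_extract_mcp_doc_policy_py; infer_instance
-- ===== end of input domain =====

-- B replaces A's single stateful loop (4 mutable fields) by a tag-then-extract decomposition: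
-- one pass tags each line with its section, then three independent comprehensions extract
-- purpose/tools/notes (objective: simpler decomposition, same cost).

-- ===== PORT A =====
-- module-level set literal of A
def pvNoteSections : PySem.Set String :=
  PySem.Set.ofList ["important limitations for calling agents", "constraints",
                    "constraints and limits", "reliability notes for calling agents"]

-- line[3:].split("`", 1)[0]  (split with a non-empty sep always yields a non-empty list,
-- so the [0] never raises; getD 0 "" is exact here)
def pvToolName (line : String) : String :=
  ((PySem.Str.splitMax? (PySem.Str.slice line (some 3) none) "`" 1).getD []).getD 0 ""

-- one iteration of A's for-loop over (section, purpose, tools, notes)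
def pvStepA (st : String × String × List String × List String) (raw_line : String) :
    String × String × List String × List String :=
  let line := PySem.Str.strip raw_line
  if line = "" then st
  else if PySem.Str.startswith line "## " then
    (PySem.Str.lower (PySem.Str.strip (PySem.Str.slice line (some 3) none)), st.2)
  else if st.1 = "purpose" ∧ st.2.1 = "" then (st.1, line, st.2.2)
  else if st.1 = "tool catalog" ∧ PySem.Str.startswith line "- `" = true then
    (st.1, st.2.1, st.2.2.1 ++ [pvToolName line], st.2.2.2)
  else if st.1 ∈ pvNoteSections ∧ PySem.Str.startswith line "- " = true then
    (st.1, st.2.1, st.2.2.1, st.2.2.2 ++ [PySem.Str.strip (PySem.Str.slice line (some 2) none)])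
  else st

def extract_mcp_doc_policy_py (server_name : String) (body : String) : String :=
  let st := (PySem.Str.splitlines body).foldl pvStepA ("", "", [], [])
  let purpose := st.2.1
  let tools := st.2.2.1
  let notes := st.2.2.2
  let tool_preview := if tools ≠ [] then PySem.Str.join ", " (PySem.List.slice tools none (some 12)) else "no tools listed"
  let note_preview := if notes ≠ [] then PySem.Str.join "; " (PySem.List.slice notes none (some 2)) else "no additional constraints"
  let purpose_text := if purpose ≠ "" then purpose else "no purpose section"
  server_name ++ ": purpose=" ++ purpose_text ++ "; tools=" ++ tool_preview ++ "; notes=" ++ note_preview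

-- ===== PORT B =====
-- pass 1 of B: tag every non-empty non-header line with the current section name
def pvTagLines (sec : String) : List String → List (String × String)
  | [] => []
  | raw_line :: rest =>
    let line := PySem.Str.strip raw_line
    if PySem.Str.startswith line "## " then
      pvTagLines (PySem.Str.lower (PySem.Str.strip (PySem.Str.slice line (some 3) none))) rest
    else if line ≠ "" then (sec, line) :: pvTagLines sec rest
    else pvTagLines sec rest

-- purpose_lines[0] if purpose_lines else ""
def pvPurposeOf (tagged : List (String × String)) : String :=
  match (tagged.filter (fun sl => sl.1 == "purpose")).map Prod.snd with
  | [] => ""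
  | x :: _ => x

def pvToolsOf (tagged : List (String × String)) : List String :=
  tagged.filterMap (fun sl =>
    if sl.1 == "tool catalog" && PySem.Str.startswith sl.2 "- `" then some (pvToolName sl.2) else none)

def pvNotesOf (tagged : List (String × String)) : List String :=
  tagged.filterMap (fun sl =>
    if PySem.Set.contains pvNoteSections sl.1 && PySem.Str.startswith sl.2 "- " then
      some (PySem.Str.strip (PySem.Str.slice sl.2 (some 2) none)) else none)

def extract_mcp_doc_policy_py_alt (server_name : String) (body : String) : String :=
  let tagged := pvTagLines "" (PySem.Str.splitlines body)
  let purpose := pvPurposeOf tagged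
  let tools := pvToolsOf tagged
  let notes := pvNotesOf tagged
  let tool_preview := if tools ≠ [] then PySem.Str.join ", " (PySem.List.slice tools none (some 12)) else "no tools listed"
  let note_preview := if notes ≠ [] then PySem.Str.join "; " (PySem.List.slice notes none (some 2)) else "no additional constraints"
  let purpose_text := if purpose ≠ "" then purpose else "no purpose section"
  server_name ++ ": purpose=" ++ purpose_text ++ "; tools=" ++ tool_preview ++ "; notes=" ++ note_preview

-- ===== PRECONDITION & SPEC =====
def Spec_extract_mcp_doc_policy_py (server_name : String) (body : String) (out : String) : Prop := out = extract_mcp_doc_policy_py_alt server_name body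
instance (server_name : String) (body : String) (out : String) : Decidable (Spec_extract_mcp_doc_policy_py server_name body out) := by unfold Spec_extract_mcp_doc_policy_py; infer_instance

-- ===== CLAIM (what is proved, stated in full; the proofs are below) =====
def Claim_equal_extract_mcp_doc_policy_py : Prop := ∀ (server_name : String) (body : String), Dom_extract_mcp_doc_policy_py server_name body → Spec_extract_mcp_doc_policy_py server_name body (extract_mcp_doc_policy_py server_name body)

-- ===== LEMMAS AND PROOFS =====

lemma pv_purposeOf_cons (s l : String) (tg : List (String × String)) :
    pvPurposeOf ((s, l) :: tg) = if s = "purpose" then l else pvPurposeOf tg := by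
  by_cases h : s = "purpose" <;> simp [pvPurposeOf, h]

lemma pv_toolsOf_cons (s l : String) (tg : List (String × String)) :
    pvToolsOf ((s, l) :: tg)
      = if s = "tool catalog" ∧ PySem.Str.startswith l "- `" = true
        then pvToolName l :: pvToolsOf tg else pvToolsOf tg := by
  by_cases h1 : s = "tool catalog" <;> by_cases h2 : PySem.Str.startswith l "- `" = true <;>
    simp at h2 <;> simp [pvToolsOf, h1, h2]

lemma pv_notesOf_cons (s l : String) (tg : List (String × String)) :
    pvNotesOf ((s, l) :: tg)
      = if s ∈ pvNoteSections ∧ PySem.Str.startswith l "- " = true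
        then PySem.Str.strip (PySem.Str.slice l (some 2) none) :: pvNotesOf tg else pvNotesOf tg := by
  by_cases h1 : s ∈ pvNoteSections <;> by_cases h2 : PySem.Str.startswith l "- " = true <;>
    simp at h2 <;> simp [pvNotesOf, h1, h2]

lemma pv_purpose_not_note : ("purpose" : String) ∉ pvNoteSections := by decide
lemma pv_tool_not_note : ("tool catalog" : String) ∉ pvNoteSections := by decide

-- Invariant: A's loop from state (sec, p, t, n) ends with purpose = p (if already set,
-- else the first purpose line of the tagged tail), tools = t ++ tools of the tagged tail,
-- notes = n ++ notes of the tagged tail.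
lemma pv_loopA (ls : List String) : ∀ (sec p : String) (t n : List String),
    ∃ sec', ls.foldl pvStepA (sec, p, t, n) =
      (sec', (if p = "" then pvPurposeOf (pvTagLines sec ls) else p),
        t ++ pvToolsOf (pvTagLines sec ls), n ++ pvNotesOf (pvTagLines sec ls)) := by
  induction ls with
  | nil =>
    intro sec p t n
    exact ⟨sec, by simp [pvTagLines, pvPurposeOf, pvToolsOf, pvNotesOf]⟩
  | cons raw rest ih =>
    intro sec p t n
    simp only [List.foldl_cons]
    by_cases he : PySem.Str.strip raw = ""
    · have h0 : PySem.Chars.strip raw.toList = [] := by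
        have := congrArg String.toList he
        simpa using this
      have hh' : PySem.Chars.startswith (PySem.Chars.strip raw.toList) ['#', '#', ' '] = false := by
        rw [h0]; decide
      simpa [pvStepA, pvTagLines, he, hh'] using ih sec p t n
    · by_cases hh : PySem.Str.startswith (PySem.Str.strip raw) "## " = true
      · have hh' : PySem.Chars.startswith (PySem.Chars.strip raw.toList) ['#', '#', ' '] = true := by
          simpa using hh
        simpa [pvStepA, pvTagLines, he, hh'] using
          ih (PySem.Str.lower (PySem.Str.strip (PySem.Str.slice (PySem.Str.strip raw) (some 3) none))) p t n
      · have hh' : PySem.Chars.startswith (PySem.Chars.strip raw.toList) ['#', '#', ' '] = false := by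
          simpa using hh
        have htag : pvTagLines sec (raw :: rest)
            = (sec, PySem.Str.strip raw) :: pvTagLines sec rest := by
          simp [pvTagLines, he, hh']
        have hstep : pvStepA (sec, p, t, n) raw
            = (if sec = "purpose" ∧ p = "" then (sec, PySem.Str.strip raw, t, n)
               else if sec = "tool catalog" ∧ PySem.Str.startswith (PySem.Str.strip raw) "- `" = true
                 then (sec, p, t ++ [pvToolName (PySem.Str.strip raw)], n)
               else if sec ∈ pvNoteSections ∧ PySem.Str.startswith (PySem.Str.strip raw) "- " = true
                 then (sec, p, t, n ++ [PySem.Str.strip (PySem.Str.slice (PySem.Str.strip raw) (some 2) none)])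
               else (sec, p, t, n)) := by
          simp [pvStepA, he, hh']
        rw [hstep, htag, pv_purposeOf_cons, pv_toolsOf_cons, pv_notesOf_cons]
        by_cases hp : sec = "purpose" ∧ p = ""
        · obtain ⟨hs, hpp⟩ := hp
          subst hs hpp
          obtain ⟨sec', hrec⟩ := ih "purpose" (PySem.Str.strip raw) t n
          refine ⟨sec', ?_⟩
          rw [if_pos ⟨rfl, rfl⟩, hrec, if_neg he, if_pos rfl, if_pos rfl,
            if_neg (fun h => absurd h.1 (by decide)),
            if_neg (fun h => pv_purpose_not_note h.1)]
        · by_cases ht : sec = "tool catalog" ∧ PySem.Str.startswith (PySem.Str.strip raw) "- `" = true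
          · obtain ⟨sec', hrec⟩ := ih sec p (t ++ [pvToolName (PySem.Str.strip raw)]) n
            refine ⟨sec', ?_⟩
            have hsp : sec ≠ "purpose" := by rw [ht.1]; decide
            have hsn : ¬ (sec ∈ pvNoteSections ∧ PySem.Str.startswith (PySem.Str.strip raw) "- " = true) := by
              rw [ht.1]; exact fun h => pv_tool_not_note h.1
            rw [if_neg hp, if_pos ht, hrec, if_neg hsp, if_pos ht, if_neg hsn]
            simp
          · by_cases hn : sec ∈ pvNoteSections ∧ PySem.Str.startswith (PySem.Str.strip raw) "- " = true
            · obtain ⟨sec', hrec⟩ := ih sec p t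
                (n ++ [PySem.Str.strip (PySem.Str.slice (PySem.Str.strip raw) (some 2) none)])
              refine ⟨sec', ?_⟩
              have hsp : sec ≠ "purpose" := by
                intro h; apply pv_purpose_not_note; rw [← h]; exact hn.1
              rw [if_neg hp, if_neg ht, if_pos hn, hrec, if_neg hsp, if_neg ht, if_pos hn]
              simp
            · obtain ⟨sec', hrec⟩ := ih sec p t n
              refine ⟨sec', ?_⟩
              rw [if_neg hp, if_neg ht, if_neg hn, hrec, if_neg ht, if_neg hn]
              by_cases hpp : p = ""
              · have hsp : sec ≠ "purpose" := fun h => hp ⟨h, hpp⟩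
                rw [if_neg hsp]
              · simp [hpp]

-- ===== VERDICT (by name: the statement is the Claim_ definition above) =====
theorem extract_mcp_doc_policy_py_spec : Claim_equal_extract_mcp_doc_policy_py := by
  intro server_name body _
  unfold Spec_extract_mcp_doc_policy_py extract_mcp_doc_policy_py extract_mcp_doc_policy_py_alt
  obtain ⟨sec', h⟩ := pv_loopA (PySem.Str.splitlines body) "" "" [] []
  simp only [h]
  simp
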